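-- pv_equiv track=rewrite | github.com/allenai/savn | datasets/scene_util.py | get_scenes
-- ===== SOURCE A (Python) =====
-- def make_scene_name(type, num):
--     if type == "":
--         return "FloorPlan" + str(num)
--     elif num < 10:
--         return "FloorPlan" + type + "0" + str(num)
--     else:
--         return "FloorPlan" + type + str(num)
--
-- def get_scenes(scene_str):
--     scene_str_split = scene_str.split("+")
--     if len(scene_str_split) == 1:
--         return scene_str_split[0][1:-1].split(",")
--     else:
--         pre = scene_str_split[0][1:-1].split(",")
--         for i in range(len(pre)):
--             if pre[i] == "0":
--                 pre[i] = ""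
--
--         post = scene_str_split[1][1:-1].split("-")
--         scene_names = [
--             [make_scene_name(j, i) for i in range(int(post[0]), int(post[1]) + 1)]
--             for j in pre
--         ]
--         # flatten list of lists to list
--         out = [i + "_physics" for s in scene_names for i in s]
--         new_out = []
--         for k in out:
--             if ("n3" in k or "n4" in k) and len(k) == 20:
--                 new_out.append(k[:12])
--             else:
--                 new_out.append(k)
--         return new_out
-- ===== SOURCE B (Python) =====
-- def get_scenes(scene_str):
--     parts = scene_str.split("+")
--     if len(parts) == 1:
--         return parts[0][1:-1].split(",")
--     pre = parts[0][1:-1].split(",")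
--     post = parts[1][1:-1].split("-")
--     lo, hi = int(post[0]), int(post[1])
--
--     def finish(base):
--         name = base + "_physics"
--         if ("n3" in name or "n4" in name) and len(name) == 20:
--             return name[:12]
--         return name
--
--     def build(types):
--         # structural recursion on the type list; each row is built back-to-front
--         # by prepending, walking the number range downwards
--         if not types:
--             return []
--         t = "" if types[0] == "0" else types[0]
--         acc = build(types[1:])
--         i = hi
--         while i >= lo:
--             if t == "":
--                 base = "FloorPlan" + str(i)
--             elif i < 10:
--                 base = "FloorPlan" + t + "0" + str(i)
--             else:
--                 base = "FloorPlan" + t + str(i)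
--             acc = [finish(base)] + acc
--             i -= 1
--         return acc
--
--     return build(pre)
-- ===== Notes on version B (the rewrite author's own statement) =====
-- stated objective: alternative
-- what changed: Replaces A's five staged passes (in-place '0'->'' loop, nested comprehension into a list of lists, flatten, '_physics' map, truncation loop) with a structural recursion over the type list whose rows are built back-to-front by prepending finished names while walking the number range downwards.
import Mathlib
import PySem

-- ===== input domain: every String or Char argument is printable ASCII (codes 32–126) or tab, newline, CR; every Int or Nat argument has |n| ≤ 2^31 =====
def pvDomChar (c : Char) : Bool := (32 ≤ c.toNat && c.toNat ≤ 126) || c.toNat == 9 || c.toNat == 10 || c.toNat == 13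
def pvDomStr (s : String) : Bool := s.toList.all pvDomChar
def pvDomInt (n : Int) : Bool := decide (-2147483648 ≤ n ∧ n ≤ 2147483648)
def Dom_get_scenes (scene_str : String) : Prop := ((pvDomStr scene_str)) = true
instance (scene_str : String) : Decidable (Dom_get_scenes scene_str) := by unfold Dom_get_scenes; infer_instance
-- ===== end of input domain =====

-- B rebuilds the list by structural recursion over the type list, prepending finished
-- names while walking the number range downwards, instead of A's staged passes; objective: alternative.

-- ===== PORT A =====
def pvMakeSceneName (type : String) (num : Int) : String :=
  if type = "" then "FloorPlan" ++ PySem.Int.toStr num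
  else if num < 10 then "FloorPlan" ++ type ++ "0" ++ PySem.Int.toStr num
  else "FloorPlan" ++ type ++ PySem.Int.toStr num

def get_scenes (scene_str : String) : List String :=
  let parts := (PySem.Str.split? scene_str "+").getD []   -- "+" is non-empty, so split? is some
  if parts.length = 1 then
    (PySem.Str.split? (PySem.Str.slice (parts.getD 0 "") (some 1) (some (-1))) ",").getD []
  else
    let pre0 := (PySem.Str.split? (PySem.Str.slice (parts.getD 0 "") (some 1) (some (-1))) ",").getD []
    -- 'for i in range(len(pre)): if pre[i] == "0": pre[i] = ""' — elementwise in-place update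
    let pre := pre0.map (fun p => if p = "0" then "" else p)
    let post := (PySem.Str.split? (PySem.Str.slice (parts.getD 1 "") (some 1) (some (-1))) "-").getD []
    let lo := (PySem.Int.ofStr? (post.getD 0 "")).getD 0   -- Pre_ guarantees isSome
    let hi := (PySem.Int.ofStr? (post.getD 1 "")).getD 0   -- Pre_ guarantees isSome
    let scene_names := pre.map (fun j =>
      (PySem.List.pyRange lo (hi + 1) 1).map (fun i => pvMakeSceneName j i))
    let out := scene_names.flatMap (fun s => s.map (fun i => i ++ "_physics"))
    out.foldl (fun acc k =>
      if (PySem.Str.isIn "n3" k || PySem.Str.isIn "n4" k) && (PySem.Str.len k == 20) then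
        acc ++ [PySem.Str.slice k none (some 12)]
      else acc ++ [k]) []

-- ===== PORT B =====
def pvFinish (base : String) : String :=
  let name := base ++ "_physics"
  if (PySem.Str.isIn "n3" name || PySem.Str.isIn "n4" name) && (PySem.Str.len name == 20) then
    PySem.Str.slice name none (some 12)
  else name

-- the 'while i >= lo: acc = [finish(base)] + acc; i -= 1' loop, fuel = number of iterations
def pvRow (t : String) : Nat → Int → List String → List String
  | 0, _, acc => acc
  | n + 1, i, acc =>
      let base := if t = "" then "FloorPlan" ++ PySem.Int.toStr i
                  else if i < 10 then "FloorPlan" ++ t ++ "0" ++ PySem.Int.toStr i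
                  else "FloorPlan" ++ t ++ PySem.Int.toStr i
      pvRow t n (i - 1) ([pvFinish base] ++ acc)

def pvBuild (lo hi : Int) : List String → List String
  | [] => []
  | j :: rest =>
      let t := if j = "0" then "" else j
      pvRow t (hi - lo + 1).toNat hi (pvBuild lo hi rest)

def get_scenes_alt (scene_str : String) : List String :=
  let parts := (PySem.Str.split? scene_str "+").getD []
  if parts.length = 1 then
    (PySem.Str.split? (PySem.Str.slice (parts.getD 0 "") (some 1) (some (-1))) ",").getD []
  else
    let pre := (PySem.Str.split? (PySem.Str.slice (parts.getD 0 "") (some 1) (some (-1))) ",").getD []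
    let post := (PySem.Str.split? (PySem.Str.slice (parts.getD 1 "") (some 1) (some (-1))) "-").getD []
    let lo := (PySem.Int.ofStr? (post.getD 0 "")).getD 0   -- Pre_ guarantees isSome
    let hi := (PySem.Int.ofStr? (post.getD 1 "")).getD 0   -- Pre_ guarantees isSome
    pvBuild lo hi pre

-- ===== PRECONDITION & SPEC =====
-- Pre_ excludes exactly the inputs on which A raises: in the multi-part branch Python indexes
-- the dash-separated range bounds and applies int(...) to them, raising IndexError / ValueError
-- when there are fewer than two pieces or a piece is not an integer literal.
def Pre_get_scenes (scene_str : String) : Prop :=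
  let parts := (PySem.Str.split? scene_str "+").getD []
  parts.length = 1 ∨
    (let post := (PySem.Str.split? (PySem.Str.slice (parts.getD 1 "") (some 1) (some (-1))) "-").getD []
     2 ≤ post.length ∧ (PySem.Int.ofStr? (post.getD 0 "")).isSome ∧
       (PySem.Int.ofStr? (post.getD 1 "")).isSome)
instance (scene_str : String) : Decidable (Pre_get_scenes scene_str) := by
  unfold Pre_get_scenes; infer_instance

def pvWitness_get_scenes : String := "[0,n3]+[9-11]"

def Spec_get_scenes (scene_str : String) (out : List String) : Prop := out = get_scenes_alt scene_str
instance (scene_str : String) (out : List String) : Decidable (Spec_get_scenes scene_str out) := by unfold Spec_get_scenes; infer_instance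

-- ===== CLAIM (what is proved, stated in full; the proofs are below) =====
def Claim_equal_get_scenes : Prop := ∀ (scene_str : String), Dom_get_scenes scene_str → Pre_get_scenes scene_str → Spec_get_scenes scene_str (get_scenes scene_str)

-- ===== LEMMAS AND PROOFS =====

-- A's truncation loop ('if c: out.append(f k) else out.append(k)') as a map
theorem pv_foldl_if (l : List String) (acc : List String) (c : String → Bool) (f : String → String) :
    l.foldl (fun acc k => if c k then acc ++ [f k] else acc ++ [k]) acc
      = acc ++ l.map (fun k => if c k then f k else k) := by
  have h : (fun (acc : List String) k => if c k then acc ++ [f k] else acc ++ [k])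
      = fun acc k => acc ++ [if c k then f k else k] := by
    funext a k; split_ifs <;> rfl
  rw [h, PySem.List.foldl_append_singleton_eq_map]

-- B's inline name builder agrees with A's make_scene_name
theorem pvBase_eq (t : String) (i : Int) :
    (if t = "" then "FloorPlan" ++ PySem.Int.toStr i
     else if i < 10 then "FloorPlan" ++ t ++ "0" ++ PySem.Int.toStr i
     else "FloorPlan" ++ t ++ PySem.Int.toStr i) = pvMakeSceneName t i := rfl

-- the downward prepending loop produces the ascending row
theorem pvRow_eq (t : String) : ∀ (n : Nat) (i : Int) (acc : List String),
    pvRow t n i acc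
      = (PySem.List.pyRange (i + 1 - n) (i + 1) 1).map (fun k => pvFinish (pvMakeSceneName t k))
          ++ acc := by
  intro n
  induction n with
  | zero =>
      intro i acc
      simp [pvRow, PySem.List.pyRange_one_eq_nil]
  | succ n ih =>
      intro i acc
      rw [pvRow, pvBase_eq, ih]
      have h1 : i + 1 - ((n : Int) + 1) = i - n := by ring
      have h2 : (i - 1) + 1 - (n : Int) = i - n := by ring
      have h3 : PySem.List.pyRange (i - n) (i + 1) 1
          = PySem.List.pyRange (i - n) i 1 ++ [i] := by
        have := PySem.List.pyRange_one_succ_right (a := i - n) (b := i) (by omega)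
        simpa using this
      push_cast
      rw [h1, h2]
      have h4 : (i - 1) + 1 = i := by ring
      rw [h4, h3]
      simp

-- one row of B equals one row of A's pipeline
theorem pvRow_full (lo hi : Int) (t : String) (acc : List String) :
    pvRow t (hi - lo + 1).toNat hi acc
      = (PySem.List.pyRange lo (hi + 1) 1).map (fun k => pvFinish (pvMakeSceneName t k)) ++ acc := by
  rw [pvRow_eq]
  by_cases h : lo ≤ hi + 1
  · have : hi + 1 - ((hi - lo + 1).toNat : Int) = lo := by omega
    rw [this]
  · have h0 : (hi - lo + 1).toNat = 0 := by omega
    rw [h0]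
    rw [PySem.List.pyRange_one_eq_nil (by omega), PySem.List.pyRange_one_eq_nil (by omega)]

-- B's recursion equals the flatMap of rows
theorem pvBuild_eq (lo hi : Int) : ∀ (pre : List String),
    pvBuild lo hi pre
      = pre.flatMap (fun j =>
          (PySem.List.pyRange lo (hi + 1) 1).map
            (fun k => pvFinish (pvMakeSceneName (if j = "0" then "" else j) k))) := by
  intro pre
  induction pre with
  | nil => rfl
  | cons j rest ih =>
      rw [pvBuild, pvRow_full, ih]
      simp

-- the whole multi-part branch: A's pipeline equals B's recursive construction
theorem pvBranch_eq (pre0 : List String) (lo hi : Int) :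
    (((pre0.map (fun p => if p = "0" then "" else p)).map (fun j =>
        (PySem.List.pyRange lo (hi + 1) 1).map (fun i => pvMakeSceneName j i))).flatMap
        (fun s => s.map (fun i => i ++ "_physics"))).foldl
      (fun acc k =>
        if (PySem.Str.isIn "n3" k || PySem.Str.isIn "n4" k) && (PySem.Str.len k == 20) then
          acc ++ [PySem.Str.slice k none (some 12)]
        else acc ++ [k]) []
    = pvBuild lo hi pre0 := by
  rw [pv_foldl_if, pvBuild_eq]
  simp only [List.map_flatMap, List.flatMap_map, List.map_map, List.nil_append]
  apply List.flatMap_congr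
  intro j _
  simp only [Function.comp_apply, List.map_map]
  apply List.map_congr_left
  intro i _
  rfl

theorem get_scenes_spec : Claim_equal_get_scenes := by
  intro s _ _
  unfold Spec_get_scenes
  simp only [get_scenes, get_scenes_alt]
  split_ifs
  · rfl
  · exact pvBranch_eq _ _ _
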